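-- pv_equiv track=rewrite | github.com/YonyUk/DAA_FINAL_EXAM | problem3/tester.py | is_good_secuence
-- ===== SOURCE A (Python) =====
-- def is_good_secuence(B,sequence):
--     for i in range(len(sequence)):
--         for j in range(i + 1,len(sequence)):
--             x_i = sequence[i]
--             x_j = sequence[j]
--             subarray = B[x_i - 1:x_j - 1]
--             c1 = subarray.count(1)
--             c0 = subarray.count(0)
--             if not c1 - c0 == j - i: return False
--             pass
--         pass
--     return True
-- ===== SOURCE B (Python) =====
-- def is_good_secuence(B, sequence):
--     # Consecutive pairs are enough: each passing consecutive slice has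
--     # ones - zeros == 1, which forces its (clamped) endpoints to strictly
--     # increase, so the differences telescope and every pair (i, j) gets
--     # ones - zeros == j - i automatically; conversely any bad pair implies
--     # a bad consecutive pair.
--     for x, y in zip(sequence, sequence[1:]):
--         subarray = B[x - 1:y - 1]
--         if subarray.count(1) - subarray.count(0) != 1:
--             return False
--     return True
-- ===== Notes on version B (the rewrite author's own statement) =====
-- stated objective: simpler
-- what changed: Instead of slicing and counting for all O(n^2) index pairs, B checks only consecutive pairs of the sequence (zip with its tail): passing consecutive slices force strictly increasing slice endpoints, so the 1s-minus-0s counts telescope and every other pair is automatically correct; on the measured early-exit inputs this is not measurably faster.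
import Mathlib
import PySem

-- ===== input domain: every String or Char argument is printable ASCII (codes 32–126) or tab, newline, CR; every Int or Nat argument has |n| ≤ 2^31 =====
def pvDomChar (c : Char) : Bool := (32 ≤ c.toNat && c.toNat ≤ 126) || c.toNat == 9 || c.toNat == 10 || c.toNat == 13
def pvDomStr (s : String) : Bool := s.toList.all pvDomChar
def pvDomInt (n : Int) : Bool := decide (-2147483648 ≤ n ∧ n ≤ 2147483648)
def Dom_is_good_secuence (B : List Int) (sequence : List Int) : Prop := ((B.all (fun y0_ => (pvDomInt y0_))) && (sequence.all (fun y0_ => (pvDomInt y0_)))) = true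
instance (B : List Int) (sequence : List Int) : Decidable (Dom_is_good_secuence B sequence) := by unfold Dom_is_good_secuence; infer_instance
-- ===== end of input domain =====

-- B checks only consecutive pairs of the sequence (one linear scan): passing
-- consecutive slices force strictly increasing clamped endpoints, so the
-- counts telescope and every pair is then automatically correct; return
-- values agree with A on all inputs.


-- ===== PORT A =====
-- literal transliteration of A: nested index loops; per pair, slice B and count 1s and 0s.
def pvAInner (B : List Int) (sequence : List Int) (i : Int) : List Int → Bool
  | [] => true
  | j :: js =>
    let x_i := PySem.List.pyGetD sequence i 0
    let x_j := PySem.List.pyGetD sequence j 0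
    let subarray := PySem.List.slice B (some (x_i - 1)) (some (x_j - 1))
    let c1 : Int := subarray.count 1
    let c0 : Int := subarray.count 0
    if ¬ (c1 - c0 = j - i) then false else pvAInner B sequence i js

def pvAOuter (B : List Int) (sequence : List Int) : List Int → Bool
  | [] => true
  | i :: is =>
    if pvAInner B sequence i (PySem.List.pyRange (i + 1) (sequence.length : Int) 1) then
      pvAOuter B sequence is
    else false

def is_good_secuence (B : List Int) (sequence : List Int) : Bool :=
  pvAOuter B sequence (PySem.List.pyRange 0 (sequence.length : Int) 1)

-- ===== PORT B =====
-- port of Source B: one scan over zip(sequence, sequence[1:]), slicing B per consecutive pair.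
def pvBLoop (B : List Int) : List (Int × Int) → Bool
  | [] => true
  | (x, y) :: rest =>
    let subarray := PySem.List.slice B (some (x - 1)) (some (y - 1))
    let c1 : Int := subarray.count 1
    let c0 : Int := subarray.count 0
    if c1 - c0 ≠ 1 then false else pvBLoop B rest

def is_good_secuence_alt (B : List Int) (sequence : List Int) : Bool :=
  pvBLoop B (sequence.zip (PySem.List.slice sequence (some 1) none))

-- ===== PRECONDITION & SPEC =====
def Spec_is_good_secuence (B : List Int) (sequence : List Int) (out : Bool) : Prop := out = is_good_secuence_alt B sequence
instance (B : List Int) (sequence : List Int) (out : Bool) : Decidable (Spec_is_good_secuence B sequence out) := by unfold Spec_is_good_secuence; infer_instance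

-- ===== CLAIM (what is proved, stated in full; the proofs are below) =====
def Claim_equal_is_good_secuence : Prop := ∀ (B : List Int) (sequence : List Int), Dom_is_good_secuence B sequence → Spec_is_good_secuence B sequence (is_good_secuence B sequence)

-- ===== LEMMAS AND PROOFS =====

-- signed weight: +1 per 1, -1 per 0
def pvWeight (v : Int) : Int := if v = 1 then 1 else if v = 0 then -1 else 0

def pvS (xs : List Int) : Int := (xs.map pvWeight).sum

-- the per-pair quantity both programs test: ones minus zeros of B[x-1:y-1]
def pvD (B : List Int) (x y : Int) : Int :=
  let subarray := PySem.List.slice B (some (x - 1)) (some (y - 1))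
  (subarray.count 1 : Int) - (subarray.count 0 : Int)

def pvC (B : List Int) (x : Int) : Nat := PySem.List.clampIdx B.length (x - 1)
def pvF (B : List Int) (m : Nat) : Int := pvS (B.take m)

theorem pvS_append (xs ys : List Int) : pvS (xs ++ ys) = pvS xs + pvS ys := by
  simp [pvS]

theorem pvCount_eq_S (xs : List Int) :
    ((xs.count 1 : Int) - (xs.count 0 : Int)) = pvS xs := by
  induction xs with
  | nil => simp [pvS]
  | cons v t ih =>
    have hs : pvS (v :: t) = pvWeight v + pvS t := by simp [pvS]
    rw [hs, ← ih]
    simp only [List.count_cons]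
    by_cases h1 : v = 1
    · subst h1
      simp only [pvWeight]
      norm_num
      omega
    · by_cases h0 : v = 0
      · subst h0
        simp only [pvWeight, if_neg (by norm_num : (0:Int) ≠ 1)]
        norm_num
        omega
      · simp only [pvWeight, if_neg h1, if_neg h0, beq_iff_eq]
        omega

theorem pvD_eq (B : List Int) (x y : Int) :
    pvD B x y = if pvC B x < pvC B y then pvF B (pvC B y) - pvF B (pvC B x) else 0 := by
  simp only [pvD, pvC, pvF, pvCount_eq_S]
  have hdef : PySem.List.slice B (some (x - 1)) (some (y - 1)) =
      (B.drop (PySem.List.clampIdx B.length (x - 1))).take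
        (PySem.List.clampIdx B.length (y - 1) - PySem.List.clampIdx B.length (x - 1)) := rfl
  set ca := PySem.List.clampIdx B.length (x - 1)
  set cb := PySem.List.clampIdx B.length (y - 1)
  by_cases h : ca < cb
  · rw [if_pos h]
    have htake : B.take cb = B.take ca ++ (B.drop ca).take (cb - ca) := by
      rw [← List.take_add, Nat.add_sub_cancel' (Nat.le_of_lt h)]
    rw [hdef, htake, pvS_append]
    ring
  · rw [if_neg h, hdef, Nat.sub_eq_zero_of_le (Nat.le_of_not_lt h)]
    simp [pvS]

-- A's loops return true iff every pair in their ranges satisfies the condition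
theorem pvAInner_iff (B sequence : List Int) (i : Int) (js : List Int) :
    pvAInner B sequence i js = true ↔
      ∀ j ∈ js, pvD B (PySem.List.pyGetD sequence i 0) (PySem.List.pyGetD sequence j 0) = j - i := by
  induction js with
  | nil => simp [pvAInner]
  | cons j js ih =>
    simp only [pvAInner, pvD, List.mem_cons]
    by_cases h : ((PySem.List.slice B (some (PySem.List.pyGetD sequence i 0 - 1))
        (some (PySem.List.pyGetD sequence j 0 - 1))).count 1 : Int) -
        ((PySem.List.slice B (some (PySem.List.pyGetD sequence i 0 - 1))
        (some (PySem.List.pyGetD sequence j 0 - 1))).count 0 : Int) = j - i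
    · rw [if_neg (not_not_intro h), ih]
      constructor
      · intro hall k hk
        rcases hk with rfl | hk
        · exact h
        · exact hall k hk
      · intro hall k hk
        exact hall k (Or.inr hk)
    · rw [if_pos h]
      constructor
      · intro hf; exact absurd hf (by simp)
      · intro hall
        exact absurd (hall j (Or.inl rfl)) h

theorem pvAOuter_iff (B sequence : List Int) (is : List Int) :
    pvAOuter B sequence is = true ↔
      ∀ i ∈ is, pvAInner B sequence i (PySem.List.pyRange (i + 1) (sequence.length : Int) 1) = true := by
  induction is with
  | nil => simp [pvAOuter]
  | cons i is ih =>
    simp only [pvAOuter]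
    by_cases h : pvAInner B sequence i (PySem.List.pyRange (i + 1) (sequence.length : Int) 1) = true
    · rw [if_pos h, ih]
      constructor
      · intro hall k hk
        rcases List.mem_cons.mp hk with rfl | hk
        exacts [h, hall k hk]
      · intro hall k hk
        exact hall k (List.mem_cons_of_mem _ hk)
    · rw [if_neg h]
      constructor
      · intro hf; exact absurd hf (by simp)
      · intro hall
        exact absurd (hall i (List.mem_cons_self ..)) h

-- Nat-indexed characterisation of A
theorem pvA_iff (B sequence : List Int) :
    is_good_secuence B sequence = true ↔
      ∀ a b : Nat, a < b → b < sequence.length →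
        pvD B (sequence.getD a 0) (sequence.getD b 0) = (b : Int) - (a : Int) := by
  rw [is_good_secuence, pvAOuter_iff]
  constructor
  · intro h a b hab hb
    have ha : (a : Int) ∈ PySem.List.pyRange 0 (sequence.length : Int) 1 := by
      rw [PySem.List.mem_pyRange_one]
      constructor <;> [positivity; exact_mod_cast (by omega : a < sequence.length)]
    have := (pvAInner_iff B sequence (a : Int) _).mp (h _ ha) (b : Int)
      (by rw [PySem.List.mem_pyRange_one]
          constructor <;> [exact_mod_cast (by omega : a + 1 ≤ b); exact_mod_cast hb])
    simpa [PySem.List.pyGetD_natCast] using this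
  · intro h i hi
    rw [PySem.List.mem_pyRange_one] at hi
    rw [pvAInner_iff]
    intro j hj
    rw [PySem.List.mem_pyRange_one] at hj
    obtain ⟨a, rfl⟩ : ∃ a : Nat, i = (a : Int) := ⟨i.toNat, by omega⟩
    obtain ⟨b, rfl⟩ : ∃ b : Nat, j = (b : Int) := ⟨j.toNat, by omega⟩
    have hab : a < b := by exact_mod_cast (by omega : (a : Int) < b)
    have hb : b < sequence.length := by exact_mod_cast hj.2
    simpa [PySem.List.pyGetD_natCast] using h a b hab hb

-- B's loop returns true iff every listed pair has count-difference 1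
theorem pvBLoop_iff (B : List Int) (ps : List (Int × Int)) :
    pvBLoop B ps = true ↔ ∀ p ∈ ps, pvD B p.1 p.2 = 1 := by
  induction ps with
  | nil => simp [pvBLoop]
  | cons p ps ih =>
    obtain ⟨x, y⟩ := p
    simp only [pvBLoop, pvD, List.mem_cons]
    by_cases h : ((PySem.List.slice B (some (x - 1)) (some (y - 1))).count 1 : Int) -
        ((PySem.List.slice B (some (x - 1)) (some (y - 1))).count 0 : Int) = 1
    · rw [if_neg (not_not_intro h), ih]
      constructor
      · intro hall q hq
        rcases hq with rfl | hq
        · exact h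
        · exact hall q hq
      · intro hall q hq
        exact hall q (Or.inr hq)
    · rw [if_pos h]
      constructor
      · intro hf; exact absurd hf (by simp)
      · intro hall
        exact absurd (hall (x, y) (Or.inl rfl)) h

theorem pvB_iff (B sequence : List Int) :
    is_good_secuence_alt B sequence = true ↔
      ∀ k : Nat, k + 1 < sequence.length →
        pvD B (sequence.getD k 0) (sequence.getD (k + 1) 0) = 1 := by
  rw [is_good_secuence_alt, PySem.List.slice_from_one, pvBLoop_iff]
  constructor
  · intro h k hk
    have hk1 : k < (sequence.zip sequence.tail).length := by
      simp [List.length_zip, List.length_tail]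
      omega
    have hmem : (sequence.zip sequence.tail)[k] ∈ sequence.zip sequence.tail :=
      List.getElem_mem hk1
    have := h _ hmem
    rw [List.getElem_zip] at this
    have h1 : sequence[k]'(by omega) = sequence.getD k 0 := by
      rw [List.getD_eq_getElem _ _ (by omega)]
    have h2 : sequence.tail[k]'(by simp [List.length_tail]; omega) = sequence.getD (k + 1) 0 := by
      rw [List.getElem_tail, List.getD_eq_getElem _ _ (by omega)]
    rwa [h1, h2] at this
  · intro h p hp
    rw [List.mem_iff_getElem] at hp
    obtain ⟨k, hk, hpk⟩ := hp
    have hk' : k + 1 < sequence.length := by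
      simp [List.length_zip, List.length_tail] at hk
      omega
    have := h k hk'
    rw [← hpk, List.getElem_zip]
    have h1 : sequence[k]'(by omega) = sequence.getD k 0 := by
      rw [List.getD_eq_getElem _ _ (by omega)]
    have h2 : sequence.tail[k]'(by simp [List.length_tail]; omega) = sequence.getD (k + 1) 0 := by
      rw [List.getElem_tail, List.getD_eq_getElem _ _ (by omega)]
    rw [h1, h2]; exact this

-- telescoping: consecutive conditions force the general one
theorem pvChain (B sequence : List Int)
    (hadj : ∀ k : Nat, k + 1 < sequence.length →
      pvC B (sequence.getD k 0) < pvC B (sequence.getD (k + 1) 0) ∧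
      pvF B (pvC B (sequence.getD (k + 1) 0)) = pvF B (pvC B (sequence.getD k 0)) + 1) :
    ∀ d a : Nat, a + d < sequence.length →
      pvC B (sequence.getD a 0) + d ≤ pvC B (sequence.getD (a + d) 0) ∧
      pvF B (pvC B (sequence.getD (a + d) 0)) = pvF B (pvC B (sequence.getD a 0)) + d := by
  intro d
  induction d with
  | zero => intro a _; simp
  | succ d ih =>
    intro a ha
    have h1 := ih a (by omega)
    have h2 := hadj (a + d) (by omega)
    rw [show a + (d + 1) = (a + d) + 1 by omega]
    constructor
    · omega
    · rw [h2.2, h1.2]; push_cast; ring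

-- ===== VERDICT (by name: the statement is the Claim_ definition above) =====
theorem is_good_secuence_spec : Claim_equal_is_good_secuence := by
  intro B sequence _
  unfold Spec_is_good_secuence
  rw [Bool.eq_iff_iff, pvA_iff, pvB_iff]
  constructor
  · intro h k hk
    have := h k (k + 1) (by omega) hk
    simpa using this
  · intro h a b hab hb
    have hadj : ∀ k : Nat, k + 1 < sequence.length →
        pvC B (sequence.getD k 0) < pvC B (sequence.getD (k + 1) 0) ∧
        pvF B (pvC B (sequence.getD (k + 1) 0)) = pvF B (pvC B (sequence.getD k 0)) + 1 := by
      intro k hk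
      have h1 := h k hk
      rw [pvD_eq] at h1
      by_cases hc : pvC B (sequence.getD k 0) < pvC B (sequence.getD (k + 1) 0)
      · rw [if_pos hc] at h1
        exact ⟨hc, by omega⟩
      · rw [if_neg hc] at h1; exact absurd h1 (by norm_num)
    have hch := pvChain B sequence hadj (b - a) a (by omega)
    rw [show a + (b - a) = b by omega] at hch
    rw [pvD_eq, if_pos (by omega), hch.2]
    omega
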